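-- pv_equiv track=rewrite | github.com/XinnuoXu/AggGen | src/prepro/data_pretrain.py | _sort_src_cross
-- ===== SOURCE A (Python) =====
-- def _sort_src_cross(ex_src, relation, relation_dict):
--     tmp_rel = {}
--     relation = relation.split('|')
--     for rel in relation:
--         tmp_rel[rel] = relation_dict[rel]
--     rel_to_record = {}
--     for i, record in enumerate(ex_src):
--         if relation[i] in rel_to_record:
--             rel_to_record[relation[i]].append(record)
--         else:
--             rel_to_record[relation[i]] = [record]
--     sorted_rel = []
--     sorted_rec = []
--     for key, value in sorted(tmp_rel.items(), key = lambda d:d[1]):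
--         for i in range(len(rel_to_record[key])):
--             sorted_rel.append(key)
--         sorted_rec.extend(rel_to_record[key])
--     return sorted_rel, sorted_rec
-- ===== SOURCE B (Python) =====
-- def _sort_src_cross(ex_src, relation, relation_dict):
--     rels = relation.split('|')
--     order = sorted(range(len(ex_src)),
--                    key=lambda i: (relation_dict[rels[i]], rels.index(rels[i])))
--     return [rels[i] for i in order], [ex_src[i] for i in order]
-- ===== Notes on version B (the rewrite author's own statement) =====
-- stated objective: simpler
-- what changed: Replaces A's bucket-into-dict-of-lists + sort-unique-keys + re-expand pipeline with one flat stable sort of the record indices keyed by (relation_dict value, first-occurrence index of the relation), followed by two maps.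
import Mathlib
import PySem

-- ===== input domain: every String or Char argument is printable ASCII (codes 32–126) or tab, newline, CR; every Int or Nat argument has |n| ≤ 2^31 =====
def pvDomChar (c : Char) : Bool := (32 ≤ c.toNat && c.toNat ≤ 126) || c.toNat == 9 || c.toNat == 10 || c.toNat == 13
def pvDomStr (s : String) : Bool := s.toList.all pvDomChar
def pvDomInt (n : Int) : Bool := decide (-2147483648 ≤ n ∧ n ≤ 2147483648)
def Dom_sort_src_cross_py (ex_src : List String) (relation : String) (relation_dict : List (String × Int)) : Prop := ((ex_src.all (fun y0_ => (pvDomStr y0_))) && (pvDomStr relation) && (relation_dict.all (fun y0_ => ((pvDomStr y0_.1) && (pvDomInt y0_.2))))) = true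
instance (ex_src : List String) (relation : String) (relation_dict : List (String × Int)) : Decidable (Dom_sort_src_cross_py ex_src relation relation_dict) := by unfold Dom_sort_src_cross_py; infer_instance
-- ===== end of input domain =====

-- B replaces A's bucket-into-dict + sort-unique-keys + re-expand with one stable sort of the
-- record indices keyed by (relation_dict value, first occurrence of the relation); objective: simpler.

-- shared helpers: relation.split('|') and the assoc-list lookup relation_dict[r] (first match, total form)
def pvSplit (s : String) : List String := (PySem.Str.split? s "|").getD []
def pvLookup (d : List (String × Int)) (r : String) : Int := ((d.find? (fun p => p.1 == r)).map (fun p => p.2)).getD 0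

-- ===== PORT A =====
def sort_src_cross_py (ex_src : List String) (relation : String) (relation_dict : List (String × Int)) : List String × List String :=
  let rels := pvSplit relation
  let tmp_rel : PySem.Dict String Int :=
    rels.foldl (fun d rel => d.insert rel (pvLookup relation_dict rel)) PySem.Dict.empty
  let rel_to_record : PySem.Dict String (List String) :=
    (PySem.List.enumerate ex_src).foldl (fun d p =>
      if d.contains (PySem.List.pyGetD rels p.1 "") then
        d.modify (PySem.List.pyGetD rels p.1 "") [] (fun v => v ++ [p.2])
      else d.insert (PySem.List.pyGetD rels p.1 "") [p.2]) PySem.Dict.empty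
  (PySem.List.sorted tmp_rel.items (fun kv => kv.2) false).foldl
    (fun acc kv =>
      ((PySem.List.pyRange 0 (PySem.List.len (rel_to_record.getD kv.1 [])) 1).foldl
         (fun sr _ => sr ++ [kv.1]) acc.1,
       acc.2 ++ rel_to_record.getD kv.1 []))
    ([], [])

-- ===== PORT B =====
def sort_src_cross_py_alt (ex_src : List String) (relation : String) (relation_dict : List (String × Int)) : List String × List String :=
  let rels := pvSplit relation
  let order := PySem.List.sorted2 (PySem.List.pyRange 0 (PySem.List.len ex_src) 1)
      (fun i => pvLookup relation_dict (PySem.List.pyGetD rels i ""))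
      (fun i => (PySem.List.index? rels (PySem.List.pyGetD rels i "")).getD 0) false
  (order.map (fun i => PySem.List.pyGetD rels i ""),
   order.map (fun i => PySem.List.pyGetD ex_src i ""))

-- ===== PRECONDITION & SPEC =====
-- Pre_ = exactly the inputs where Python A returns: no IndexError (ex_src no longer than the
-- token list), no KeyError in relation_dict, and every token owns at least one record.
def Pre_sort_src_cross_py (ex_src : List String) (relation : String) (relation_dict : List (String × Int)) : Prop :=
  ex_src.length ≤ (pvSplit relation).length ∧
  (∀ r ∈ pvSplit relation, (relation_dict.find? (fun p => p.1 == r)).isSome = true) ∧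
  (∀ r ∈ pvSplit relation, r ∈ (pvSplit relation).take ex_src.length)
instance (ex_src : List String) (relation : String) (relation_dict : List (String × Int)) : Decidable (Pre_sort_src_cross_py ex_src relation relation_dict) := by unfold Pre_sort_src_cross_py; infer_instance

def pvWitness_sort_src_cross_py : List String × String × (List (String × Int)) := (["a", "b"], "r|s", [("r", 1), ("s", 0)])

def Spec_sort_src_cross_py (ex_src : List String) (relation : String) (relation_dict : List (String × Int)) (out : List String × List String) : Prop := out = sort_src_cross_py_alt ex_src relation relation_dict
instance (ex_src : List String) (relation : String) (relation_dict : List (String × Int)) (out : List String × List String) : Decidable (Spec_sort_src_cross_py ex_src relation relation_dict out) := by unfold Spec_sort_src_cross_py; infer_instance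

-- ===== CLAIM (what is proved, stated in full; the proofs are below) =====
def Claim_equal_sort_src_cross_py : Prop := ∀ (ex_src : List String) (relation : String) (relation_dict : List (String × Int)), Dom_sort_src_cross_py ex_src relation relation_dict → Pre_sort_src_cross_py ex_src relation relation_dict → Spec_sort_src_cross_py ex_src relation relation_dict (sort_src_cross_py ex_src relation relation_dict)
-- ===== LEMMAS AND PROOFS =====

theorem pvInsertBy_congr {α : Type} (b b' : α → α → Bool) (x : α) (l : List α)
    (h : ∀ y ∈ l, b x y = b' x y) : PySem.List.insertBy b x l = PySem.List.insertBy b' x l := by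
  induction l with
  | nil => rfl
  | cons y ys ih =>
    simp only [PySem.List.insertBy]
    rw [h y (by simp)]
    by_cases hb : b' x y = true
    · simp [hb]
    · simp only [Bool.not_eq_true] at hb
      simp [hb]
      exact ih (fun z hz => h z (by simp [hz]))

theorem pvFoldl_insertBy_stable {α κ π : Type} [LinearOrder κ] [LinearOrder π]
    (key : α → κ) (pos : α → π) :
    ∀ (xs acc : List α), xs.Pairwise (fun a b => pos a < pos b) →
    (∀ x ∈ xs, ∀ y ∈ acc, pos y < pos x) →
    xs.foldl (fun l a => PySem.List.insertBy (fun a b => decide (key a < key b)) a l) acc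
      = xs.foldl (fun l a => PySem.List.insertBy
          (fun a b => decide (toLex (key a, pos a) < toLex (key b, pos b))) a l) acc := by
  intro xs
  induction xs with
  | nil => intro acc _ _; rfl
  | cons x xs ih =>
    intro acc hp hacc
    simp only [List.foldl_cons]
    have hcong : PySem.List.insertBy (fun a b => decide (key a < key b)) x acc
        = PySem.List.insertBy (fun a b => decide (toLex (key a, pos a) < toLex (key b, pos b))) x acc := by
      apply pvInsertBy_congr
      intro y hy
      have hpy : pos y < pos x := hacc x (by simp) y hy
      simp only [Prod.Lex.lt_iff]
      by_cases hk : key x < key y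
      · simp [hk]
      · simp [hk]
        intro _
        exact le_of_lt hpy
    rw [hcong]
    apply ih
    · exact hp.of_cons
    · intro z hz y hy
      rcases (PySem.List.mem_insertBy _ x y acc).mp hy with h1 | h1
      · subst h1; exact (List.pairwise_cons.mp hp).1 z hz
      · exact hacc z (by simp [hz]) y h1

theorem pvSorted_stable {α κ π : Type} [LinearOrder κ] [LinearOrder π]
    (key : α → κ) (pos : α → π) (xs : List α)
    (hx : xs.Pairwise (fun a b => pos a < pos b)) :
    PySem.List.sorted xs key false
      = PySem.List.sorted xs (fun a => toLex (key a, pos a)) false := by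
  rw [PySem.List.sorted_eq_foldl_insertBy, PySem.List.sorted_eq_foldl_insertBy]
  exact pvFoldl_insertBy_stable key pos xs [] hx (by simp)

theorem pvSorted2_eq_sorted_lex {α κ₁ κ₂ : Type} [LinearOrder κ₁] [LinearOrder κ₂]
    (xs : List α) (k1 : α → κ₁) (k2 : α → κ₂) :
    PySem.List.sorted2 xs k1 k2 false
      = PySem.List.sorted xs (fun a => toLex (k1 a, k2 a)) false := by
  rw [PySem.List.sorted_eq_foldl_insertBy]
  unfold PySem.List.sorted2
  simp only []
  congr 1
  funext l a
  congr 1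
  funext p q
  rcases lt_trichotomy (k1 p) (k1 q) with h | h | h
  · simp [Prod.Lex.lt_iff, h, not_lt_of_gt h]
  · simp [Prod.Lex.lt_iff, h]
  · simp [Prod.Lex.lt_iff, h, not_lt_of_gt h, ne_of_gt h]

theorem pvInsertBy_map {α β : Type} (f : α → β) (b : β → β → Bool) (x : α) (l : List α) :
    PySem.List.insertBy b (f x) (l.map f)
      = (PySem.List.insertBy (fun a c => b (f a) (f c)) x l).map f := by
  induction l with
  | nil => rfl
  | cons y ys ih =>
    simp only [List.map_cons, PySem.List.insertBy]
    by_cases hb : b (f x) (f y) = true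
    · simp [hb]
    · simp only [Bool.not_eq_true] at hb
      simp [hb, ih]

theorem pvSorted_map {α β κ : Type} [LinearOrder κ] (f : α → β) (key : β → κ) (xs : List α) :
    PySem.List.sorted (xs.map f) key false
      = (PySem.List.sorted xs (fun a => key (f a)) false).map f := by
  rw [PySem.List.sorted_eq_foldl_insertBy, PySem.List.sorted_eq_foldl_insertBy]
  rw [List.foldl_map]
  have : ∀ (l : List α) (acc : List α),
      l.foldl (fun acc a => PySem.List.insertBy (fun a b => decide (key a < key b)) (f a) acc) (acc.map f)
        = (l.foldl (fun acc a => PySem.List.insertBy (fun a c => decide (key (f a) < key (f c))) a acc) acc).map f := by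
    intro l
    induction l with
    | nil => intro acc; rfl
    | cons x xs ih =>
      intro acc
      simp only [List.foldl_cons]
      rw [pvInsertBy_map, ih]
  exact this xs []

theorem pvFlatMap_filter_perm {α β : Type} [BEq β] [LawfulBEq β] (f : α → β) :
    ∀ (K : List β) (l : List α), K.Nodup → (∀ i ∈ l, f i ∈ K) →
    (K.flatMap (fun k => l.filter (fun i => f i == k))).Perm l := by
  intro K
  induction K with
  | nil =>
    intro l _ h
    simp only [List.flatMap_nil]
    have : l = [] := List.eq_nil_iff_forall_not_mem.mpr (fun x hx => by simpa using h x hx)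
    simp [this]
  | cons k K ih =>
    intro l hnd hmem
    simp only [List.flatMap_cons]
    have hstep : K.flatMap (fun k' => l.filter (fun i => f i == k'))
        = K.flatMap (fun k' => (l.filter (fun i => !(f i == k))).filter (fun i => f i == k')) := by
      apply List.flatMap_congr
      intro k' hk'
      have hne : k' ≠ k := fun h => (List.nodup_cons.mp hnd).1 (h ▸ hk')
      rw [List.filter_filter]
      apply List.filter_congr
      intro i _
      by_cases h : f i = k'
      · simp [h, hne]
      · simp [h]
    rw [hstep]
    have hperm := ih (l.filter (fun i => !(f i == k))) (List.nodup_cons.mp hnd).2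
      (by
        intro i hi
        rcases List.mem_filter.mp hi with ⟨hil, hnk⟩
        have := hmem i hil
        simp only [List.mem_cons] at this
        rcases this with h1 | h1
        · simp [h1] at hnk
        · exact h1)
    exact (List.Perm.append_left _ hperm).trans (List.filter_append_perm _ l)

theorem pvGet?_foldl_insert {κ ν : Type} [BEq κ] [LawfulBEq κ] (g : κ → ν) :
    ∀ (l : List κ) (d : PySem.Dict κ ν) (k : κ),
    (l.foldl (fun d x => d.insert x (g x)) d).get? k
      = if k ∈ l then some (g k) else d.get? k := by
  intro l
  induction l with
  | nil => intro d k; simp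
  | cons x xs ih =>
    intro d k
    simp only [List.foldl_cons]
    rw [ih]
    by_cases hx : k ∈ xs
    · simp [hx]
    · by_cases hk : k = x
      · subst hk
        simp [hx, PySem.Dict.get?_insert_self]
      · simp only [List.mem_cons, hx, hk, or_self, if_false]
        exact PySem.Dict.get?_insert_of_ne d (g x) hk

theorem pvFo_lt_length {α : Type} [BEq α] [LawfulBEq α] (l : List α) (a : α) (ha : a ∈ l) :
    (PySem.List.index? l a).getD 0 < l.length := by
  rcases h : PySem.List.index? l a with _ | k
  · rw [PySem.List.index?_eq_none_iff] at h; exact absurd ha h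
  · rcases PySem.List.getElem_of_index?_eq_some h with ⟨hk, _, _⟩
    simpa using hk

theorem pvFo_inj {α : Type} [BEq α] [LawfulBEq α] (l : List α) (a b : α) (ha : a ∈ l) (hb : b ∈ l)
    (h : (PySem.List.index? l a).getD 0 = (PySem.List.index? l b).getD 0) : a = b := by
  rcases h1 : PySem.List.index? l a with _ | k1
  · rw [PySem.List.index?_eq_none_iff] at h1; exact absurd ha h1
  rcases h2 : PySem.List.index? l b with _ | k2
  · rw [PySem.List.index?_eq_none_iff] at h2; exact absurd hb h2
  rw [h1, h2] at h
  simp at h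
  subst h
  rcases PySem.List.getElem_of_index?_eq_some h1 with ⟨hk1, he1, _⟩
  rcases PySem.List.getElem_of_index?_eq_some h2 with ⟨hk2, he2, _⟩
  rw [← he1, ← he2]

theorem pvOfList_pairwise_fo {α : Type} [BEq α] [LawfulBEq α] (l : List α) :
    (PySem.Set.ofList l).Pairwise
      (fun a b => (PySem.List.index? l a).getD 0 < (PySem.List.index? l b).getD 0) := by
  induction l using List.reverseRecOn with
  | nil => simp [PySem.Set.ofList, PySem.Set.empty]
  | append_singleton l x ih =>
    have hof : PySem.Set.ofList (l ++ [x]) = PySem.Set.add (PySem.Set.ofList l) x := by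
      simp [PySem.Set.ofList, List.foldl_append]
    rw [hof]
    have hidx : ∀ a ∈ PySem.Set.ofList l,
        PySem.List.index? (l ++ [x]) a = PySem.List.index? l a := by
      intro a hamem
      exact PySem.List.index?_append_of_mem _ ((PySem.Set.mem_ofList l a).mp hamem)
    have hpw : (PySem.Set.ofList l).Pairwise
        (fun a b => (PySem.List.index? (l ++ [x]) a).getD 0 < (PySem.List.index? (l ++ [x]) b).getD 0) := by
      refine List.Pairwise.imp_of_mem ?_ ih
      intro a b hamem hbmem hab
      rw [hidx a hamem, hidx b hbmem]
      exact hab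
    unfold PySem.Set.add
    by_cases hc : (PySem.Set.ofList l).contains x = true
    · rw [if_pos hc]; exact hpw
    · rw [if_neg hc]
      rw [List.pairwise_append]
      refine ⟨hpw, by simp, ?_⟩
      intro a hamem b hb
      simp only [List.mem_singleton] at hb
      rw [hb]
      have hxl : x ∉ l := by
        intro hxl
        exact hc (by
          unfold PySem.Set.contains
          simp [(PySem.Set.mem_ofList l x).mpr hxl])
      rw [hidx a hamem, PySem.List.index?_append_singleton_self l x hxl]
      have := pvFo_lt_length l a ((PySem.Set.mem_ofList l a).mp hamem)
      simpa using this

def pvFo (rels : List String) (r : String) : Nat := (PySem.List.index? rels r).getD 0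
def pvKV (rd : List (String × Int)) (rels : List String) (k : String) : Lex (Int × Nat) := toLex (pvLookup rd k, pvFo rels k)
def pvSK (rd : List (String × Int)) (rels : List String) : List String := PySem.List.sorted (PySem.Set.ofList rels) (pvKV rd rels) false
def pvRelAtN (rels : List String) (j : Nat) : String := PySem.List.pyGetD rels (j : Int) ""
def pvIdxs (rels : List String) (n : Nat) (k : String) : List Nat := (List.range n).filter (fun j => pvRelAtN rels j == k)
def pvTarget (ex_src : List String) (rd : List (String × Int)) (rels : List String) : List String × List String :=
  ((pvSK rd rels).flatMap (fun k => List.replicate (pvIdxs rels ex_src.length k).length k),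
   (pvSK rd rels).flatMap (fun k => (pvIdxs rels ex_src.length k).map (fun j : Nat => PySem.List.pyGetD ex_src (j : Int) "")))

theorem pvGroup (ex_src rels : List String) (k : String) :
    ((PySem.List.enumerate ex_src).foldl (fun d p =>
      if d.contains (PySem.List.pyGetD rels p.1 "") then
        d.modify (PySem.List.pyGetD rels p.1 "") [] (fun v => v ++ [p.2])
      else d.insert (PySem.List.pyGetD rels p.1 "") [p.2]) PySem.Dict.empty).getD k []
    = (pvIdxs rels ex_src.length k).map (fun j : Nat => PySem.List.pyGetD ex_src (j : Int) "") := by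
  have hstep1 : (PySem.List.enumerate ex_src).foldl (fun d p =>
      if d.contains (PySem.List.pyGetD rels p.1 "") then
        d.modify (PySem.List.pyGetD rels p.1 "") [] (fun v => v ++ [p.2])
      else d.insert (PySem.List.pyGetD rels p.1 "") [p.2]) PySem.Dict.empty
      = (PySem.List.enumerate ex_src).foldl (fun d p =>
          d.modify (PySem.List.pyGetD rels p.1 "") [] (fun v => v ++ [p.2])) PySem.Dict.empty := by
    apply PySem.List.foldl_congr_mem
    intro d p _
    by_cases hc : d.contains (PySem.List.pyGetD rels p.1 "") = true
    · simp [hc]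
    · simp only [Bool.not_eq_true] at hc
      simp only [hc, Bool.false_eq_true, if_false]
      unfold PySem.Dict.modify
      rw [PySem.Dict.getD_of_not_contains _ _ hc]
      rfl
  rw [hstep1]
  have h2 : (PySem.List.enumerate ex_src).foldl (fun d p =>
        d.modify (PySem.List.pyGetD rels p.1 "") [] (fun v => v ++ [p.2])) PySem.Dict.empty
      = ((PySem.List.enumerate ex_src).map (fun p => (PySem.List.pyGetD rels p.1 "", p.2))).foldl
          (fun d p => d.modify p.1 [] (fun v => v ++ [p.2])) PySem.Dict.empty := by
    rw [List.foldl_map]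
  rw [h2]
  rw [PySem.Dict.getD_foldl_modify_append]
  rw [PySem.Dict.getD_empty]
  rw [PySem.List.enumerate_eq_map_pyRange ex_src ""]
  rw [PySem.List.len_eq, PySem.List.pyRange_zero_natCast]
  rw [List.nil_append, List.map_map, List.map_map, List.filter_map, List.map_map]
  rfl

theorem pvA_char (ex_src : List String) (relation : String) (rd : List (String × Int)) :
    sort_src_cross_py ex_src relation rd = pvTarget ex_src rd (pvSplit relation) := by
  unfold sort_src_cross_py
  simp only []
  -- tmp_rel items
  have hnd : ((pvSplit relation).foldl (fun d rel => d.insert rel (pvLookup rd rel)) PySem.Dict.empty).keys.Nodup :=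
    PySem.Dict.nodup_keys_foldl_insert (pvSplit relation) (fun _ x => pvLookup rd x) PySem.Dict.empty PySem.Dict.nodup_keys_empty
  have hkeys : ((pvSplit relation).foldl (fun d rel => d.insert rel (pvLookup rd rel)) PySem.Dict.empty).keys
      = PySem.Set.ofList (pvSplit relation) := by
    have := PySem.Dict.keys_foldl_insert (pvSplit relation) (fun _ x => pvLookup rd x) (PySem.Dict.empty (κ := String) (ν := Int))
    rw [this, PySem.Dict.keys_empty]
    rfl
  have hitems : ((pvSplit relation).foldl (fun d rel => d.insert rel (pvLookup rd rel)) PySem.Dict.empty).items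
      = (PySem.Set.ofList (pvSplit relation)).map (fun k => (k, pvLookup rd k)) := by
    rw [PySem.Dict.items_eq_map_keys _ hnd 0, hkeys]
    apply List.map_congr_left
    intro a ha
    have hmem : a ∈ pvSplit relation := (PySem.Set.mem_ofList _ _).mp ha
    rw [PySem.Dict.getD_eq_get?_getD, pvGet?_foldl_insert (fun x => pvLookup rd x) _ _ a]
    simp [hmem]
  rw [hitems]
  -- sort: map out, then stabilize
  have hsortmap : PySem.List.sorted ((PySem.Set.ofList (pvSplit relation)).map (fun k => (k, pvLookup rd k))) (fun kv => kv.2) false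
      = (pvSK rd (pvSplit relation)).map (fun k => (k, pvLookup rd k)) := by
    rw [pvSorted_map (fun k => (k, pvLookup rd k)) (fun kv => kv.2) (PySem.Set.ofList (pvSplit relation))]
    congr 1
    have hstab := pvSorted_stable (fun k => pvLookup rd k) (pvFo (pvSplit relation)) (PySem.Set.ofList (pvSplit relation))
      (pvOfList_pairwise_fo (pvSplit relation))
    exact hstab
  rw [hsortmap]
  -- split the product fold
  rw [List.foldl_map]
  rw [PySem.List.foldl_prod_mk
    (fun sr (k : String) => (PySem.List.pyRange 0 (PySem.List.len ((((PySem.List.enumerate ex_src).foldl (fun d p =>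
      if d.contains (PySem.List.pyGetD (pvSplit relation) p.1 "") then
        d.modify (PySem.List.pyGetD (pvSplit relation) p.1 "") [] (fun v => v ++ [p.2])
      else d.insert (PySem.List.pyGetD (pvSplit relation) p.1 "") [p.2]) PySem.Dict.empty).getD k []))) 1).foldl
         (fun sr _ => sr ++ [k]) sr)
    (fun sc (k : String) => sc ++ (((PySem.List.enumerate ex_src).foldl (fun d p =>
      if d.contains (PySem.List.pyGetD (pvSplit relation) p.1 "") then
        d.modify (PySem.List.pyGetD (pvSplit relation) p.1 "") [] (fun v => v ++ [p.2])
      else d.insert (PySem.List.pyGetD (pvSplit relation) p.1 "") [p.2]) PySem.Dict.empty).getD k []))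
    (pvSK rd (pvSplit relation)) [] []]
  simp only [pvGroup ex_src (pvSplit relation)]
  simp only [PySem.List.len_eq, List.length_map]
  have hinner : ∀ (k : String) (sr : List String) (m : Nat),
      (PySem.List.pyRange 0 (m : Int)).foldl (fun sr _ => sr ++ [k]) sr = sr ++ List.replicate m k := by
    intro k sr m
    rw [PySem.List.foldl_append_singleton_eq_map (fun _ => k)]
    rw [PySem.List.pyRange_zero_natCast, List.map_map]
    simp [Function.comp_def]
  simp only [hinner]
  rw [PySem.List.foldl_append_eq_flatMap (fun k => List.replicate (pvIdxs (pvSplit relation) ex_src.length k).length k)]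
  rw [PySem.List.foldl_append_eq_flatMap (fun k => (pvIdxs (pvSplit relation) ex_src.length k).map (fun j : Nat => PySem.List.pyGetD ex_src (j : Int) ""))]
  rfl

theorem pvSK_pairwise_lt (rd : List (String × Int)) (rels : List String) :
    (pvSK rd rels).Pairwise (fun a b => pvKV rd rels a < pvKV rd rels b) := by
  have hle : (pvSK rd rels).Pairwise (fun a b => pvKV rd rels a ≤ pvKV rd rels b) :=
    PySem.List.sorted_pairwise (PySem.Set.ofList rels) (pvKV rd rels)
  have hnd : (pvSK rd rels).Nodup :=
    (PySem.List.sorted_perm (PySem.Set.ofList rels) (pvKV rd rels) false).symm.nodup (PySem.Set.nodup_ofList rels)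
  have hmem : ∀ a ∈ pvSK rd rels, a ∈ rels := by
    intro a ha
    have := (PySem.List.mem_sorted (PySem.Set.ofList rels) (pvKV rd rels) false a).mp ha
    exact (PySem.Set.mem_ofList rels a).mp this
  refine (hle.and hnd).imp_of_mem ?_
  intro a b ha hb hab
  rcases hab with ⟨hle', hne⟩
  refine lt_of_le_of_ne hle' ?_
  intro heq
  apply hne
  unfold pvKV at heq
  rw [toLex_inj, Prod.mk.injEq] at heq
  exact pvFo_inj rels a b (hmem a ha) (hmem b hb) heq.2

theorem pvIdxs_rel (rels : List String) (n : Nat) (k : String) :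
    ∀ j ∈ pvIdxs rels n k, pvRelAtN rels j = k := by
  intro j hj
  have := (List.mem_filter.mp hj).2
  simpa using this

theorem pvIdxs_pairwise (rels : List String) (n : Nat) (k : String) :
    (pvIdxs rels n k).Pairwise (fun a b => a < b) :=
  List.Pairwise.filter _ (List.pairwise_lt_range)

theorem pvSN_char (ex_src : List String) (rd : List (String × Int)) (rels : List String)
    (h1 : ex_src.length ≤ rels.length) :
    PySem.List.sorted (List.range ex_src.length)
        (fun j => toLex (toLex (pvLookup rd (pvRelAtN rels j), pvFo rels (pvRelAtN rels j)), j)) false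
      = (pvSK rd rels).flatMap (fun k => pvIdxs rels ex_src.length k) := by
  apply PySem.List.sorted_eq_of_perm_of_pairwise_lt
  · -- permutation
    have hp1 : (pvSK rd rels).Perm (PySem.Set.ofList rels) :=
      PySem.List.sorted_perm (PySem.Set.ofList rels) (pvKV rd rels) false
    have hp2 : ((pvSK rd rels).flatMap (fun k => pvIdxs rels ex_src.length k)).Perm
        ((PySem.Set.ofList rels).flatMap (fun k => pvIdxs rels ex_src.length k)) :=
      hp1.flatMap (fun a _ => List.Perm.refl _)
    refine hp2.trans ?_
    have hmem : ∀ j ∈ List.range ex_src.length, pvRelAtN rels j ∈ PySem.Set.ofList rels := by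
      intro j hj
      have hjn : j < ex_src.length := List.mem_range.mp hj
      refine (PySem.Set.mem_ofList rels _).mpr ?_
      apply PySem.List.pyGetD_mem
      constructor
      · omega
      · exact_mod_cast lt_of_lt_of_le hjn h1
    exact pvFlatMap_filter_perm (fun j => pvRelAtN rels j) (PySem.Set.ofList rels)
      (List.range ex_src.length) (PySem.Set.nodup_ofList rels) hmem
  · -- pairwise strictly increasing keys
    rw [List.flatMap_def, List.pairwise_flatten]
    constructor
    · intro l' hl'
      rcases List.mem_map.mp hl' with ⟨k, _, rfl⟩
      refine (pvIdxs_pairwise rels ex_src.length k).imp_of_mem ?_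
      intro a b ha hb hab
      rw [Prod.Lex.lt_iff]
      right
      constructor
      · show toLex (pvLookup rd (pvRelAtN rels a), pvFo rels (pvRelAtN rels a))
            = toLex (pvLookup rd (pvRelAtN rels b), pvFo rels (pvRelAtN rels b))
        rw [pvIdxs_rel rels _ k a ha, pvIdxs_rel rels _ k b hb]
      · exact hab
    · rw [List.pairwise_map]
      refine (pvSK_pairwise_lt rd rels).imp_of_mem ?_
      intro a b _ _ hab x hx y hy
      rw [Prod.Lex.lt_iff]
      left
      show toLex (pvLookup rd (pvRelAtN rels x), pvFo rels (pvRelAtN rels x))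
          < toLex (pvLookup rd (pvRelAtN rels y), pvFo rels (pvRelAtN rels y))
      rw [pvIdxs_rel rels _ a x hx, pvIdxs_rel rels _ b y hy]
      exact hab

theorem pvB_char (ex_src : List String) (relation : String) (rd : List (String × Int))
    (h1 : ex_src.length ≤ (pvSplit relation).length) :
    sort_src_cross_py_alt ex_src relation rd = pvTarget ex_src rd (pvSplit relation) := by
  unfold sort_src_cross_py_alt
  simp only []
  have horder : PySem.List.sorted2 (PySem.List.pyRange 0 (PySem.List.len ex_src) 1)
      (fun i => pvLookup rd (PySem.List.pyGetD (pvSplit relation) i ""))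
      (fun i => (PySem.List.index? (pvSplit relation) (PySem.List.pyGetD (pvSplit relation) i "")).getD 0) false
      = ((pvSK rd (pvSplit relation)).flatMap (fun k => pvIdxs (pvSplit relation) ex_src.length k)).map
          (fun j : Nat => (j : Int)) := by
    rw [PySem.List.len_eq, PySem.List.pyRange_zero_natCast]
    rw [pvSorted2_eq_sorted_lex]
    rw [pvSorted_map (fun k : Nat => (k : Int))
      (fun i : Int => toLex (pvLookup rd (PySem.List.pyGetD (pvSplit relation) i ""),
        (PySem.List.index? (pvSplit relation) (PySem.List.pyGetD (pvSplit relation) i "")).getD 0))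
      (List.range ex_src.length)]
    rw [← pvSN_char ex_src rd (pvSplit relation) h1]
    congr 1
    exact pvSorted_stable
      (fun j : Nat => toLex (pvLookup rd (pvRelAtN (pvSplit relation) j), pvFo (pvSplit relation) (pvRelAtN (pvSplit relation) j)))
      (fun j : Nat => j) (List.range ex_src.length) List.pairwise_lt_range
  rw [horder]
  rw [List.map_map, List.map_map]
  unfold pvTarget
  rw [List.map_flatMap, List.map_flatMap]
  rw [Prod.mk.injEq]
  constructor
  · apply List.flatMap_congr
    intro k _
    rw [List.eq_replicate_iff]
    constructor
    · rw [List.length_map]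
    · intro b hb
      rcases List.mem_map.mp hb with ⟨j, hj, rfl⟩
      exact pvIdxs_rel (pvSplit relation) ex_src.length k j hj
  · rfl

-- ===== VERDICT (by name: the statement is the Claim_ definition above) =====
theorem sort_src_cross_py_spec : Claim_equal_sort_src_cross_py := by
  intro ex_src relation relation_dict _ hpre
  unfold Spec_sort_src_cross_py
  rw [pvA_char, pvB_char ex_src relation relation_dict hpre.1]
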